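-- pv_equiv track=rewrite | github.com/chanderbhanswami/texas-data-scraper | src/utils/helpers.py | find_taxpayer_id_field
-- ===== SOURCE A (Python) =====
-- from typing import Any, Dict, List, Optional, Union
--
-- TAXPAYER_ID_FIELDS = [
--     'taxpayer_id',
--     'taxpayer_number',
--     'taxpayerid',
--     'taxpayernumber',
--     'taxpayerId',
--     'taxpayerID',
--     'TaxpayerID',
--     'TaxpayerNumber',
--     'TAXPAYER_ID',
--     'TAXPAYER_NUMBER',
--     'tax_payer_number',
--     'tax_payer_id',
--     'taxpayer_no',
--     'taxpayerno',
--     'txpayer_id',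
--     'txpayer_number',
--     'tp_id',
--     'tp_number',
--     'id',
-- ]
--
-- def find_taxpayer_id_field(record: Dict) -> Optional[str]:
--     """
--     Find the taxpayer ID field name in a record (case-insensitive)
--
--     Args:
--         record: Data record dictionary
--
--     Returns:
--         The actual field name containing taxpayer ID, or None
--     """
--     if not record:
--         return None
--
--     # Get all field names in the record (lowercase for comparison)
--     record_fields_lower = {k.lower(): k for k in record.keys()}
--
--     # Check each possible taxpayer ID field name
--     for id_field in TAXPAYER_ID_FIELDS:
--         # Check lowercase match
--         if id_field.lower() in record_fields_lower:
--             actual_field = record_fields_lower[id_field.lower()]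
--             if record.get(actual_field):  # Make sure it has a value
--                 return actual_field
--
--     return None
-- ===== SOURCE B (Python) =====
-- TAXPAYER_ID_FIELDS = [
--     'taxpayer_id',
--     'taxpayer_number',
--     'taxpayerid',
--     'taxpayernumber',
--     'taxpayerId',
--     'taxpayerID',
--     'TaxpayerID',
--     'TaxpayerNumber',
--     'TAXPAYER_ID',
--     'TAXPAYER_NUMBER',
--     'tax_payer_number',
--     'tax_payer_id',
--     'taxpayer_no',
--     'taxpayerno',
--     'txpayer_id',
--     'txpayer_number',
--     'tp_id',
--     'tp_number',
--     'id',
-- ]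
--
-- # Rank of each recognised (lowercased) field name: smaller = higher priority.
-- _PRIORITY = {}
-- for _i, _f in enumerate(TAXPAYER_ID_FIELDS):
--     _PRIORITY.setdefault(_f.lower(), _i)
--
--
-- def find_taxpayer_id_field(record):
--     """Single pass over the record: keep the non-empty taxpayer-ID hit with the
--     smallest priority rank, then return its original field name."""
--     survivors = {k.lower(): (k, v) for k, v in record.items()}
--     best = None
--     for low, (key, value) in survivors.items():
--         priority = _PRIORITY.get(low)
--         if priority is not None and value:
--             if best is None or priority < best[0]:
--                 best = (priority, key)
--     return None if best is None else best[1]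
-- ===== Notes on version B (the rewrite author's own statement) =====
-- stated objective: alternative
-- what changed: B inverts A's loop: instead of probing each candidate field name in priority order against a lowercase lookup of the record, B makes one pass over the record's (lowercase-deduplicated) fields and keeps the non-empty hit whose rank in a prebuilt candidate-priority table is smallest.
import Mathlib
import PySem

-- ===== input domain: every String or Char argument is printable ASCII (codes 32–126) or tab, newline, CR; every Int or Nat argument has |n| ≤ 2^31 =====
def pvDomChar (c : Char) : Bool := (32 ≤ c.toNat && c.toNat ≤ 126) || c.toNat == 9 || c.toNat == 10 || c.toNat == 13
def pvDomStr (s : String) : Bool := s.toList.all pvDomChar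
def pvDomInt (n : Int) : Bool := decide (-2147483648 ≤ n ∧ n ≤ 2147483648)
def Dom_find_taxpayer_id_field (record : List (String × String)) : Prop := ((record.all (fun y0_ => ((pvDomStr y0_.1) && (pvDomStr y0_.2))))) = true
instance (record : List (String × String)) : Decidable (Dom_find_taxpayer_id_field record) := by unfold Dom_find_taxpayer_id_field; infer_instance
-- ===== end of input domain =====

-- B inverts A's loop: instead of trying each candidate field name in priority order against the
-- record, B makes a single pass over the record's fields and keeps the non-empty hit whose
-- candidate rank (prebuilt once from TAXPAYER_ID_FIELDS) is smallest (objective: alternative).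

-- shared module constant
def pvTaxpayerIdFields : List String :=
  ["taxpayer_id", "taxpayer_number", "taxpayerid", "taxpayernumber", "taxpayerId",
   "taxpayerID", "TaxpayerID", "TaxpayerNumber", "TAXPAYER_ID", "TAXPAYER_NUMBER",
   "tax_payer_number", "tax_payer_id", "taxpayer_no", "taxpayerno", "txpayer_id",
   "txpayer_number", "tp_id", "tp_number", "id"]

-- ===== PORT A =====
-- the 'for id_field in TAXPAYER_ID_FIELDS' loop of A
def pvLoopA (d rfl_ : PySem.Dict String String) : List String → Option String
  | [] => none
  | c :: rest =>
    match rfl_.get? (PySem.Str.lower c) with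
    | some k => if (d.get? k).getD "" ≠ "" then some k else pvLoopA d rfl_ rest
    | none => pvLoopA d rfl_ rest

def find_taxpayer_id_field (record : List (String × String)) : Option String :=
  if record.isEmpty then none
  else
    let d := PySem.Dict.ofList record
    -- record_fields_lower = {k.lower(): k for k in record.keys()}
    let rfl_ := d.keys.foldl (fun m k => m.insert (PySem.Str.lower k) k) PySem.Dict.empty
    pvLoopA d rfl_ pvTaxpayerIdFields

-- ===== PORT B =====
-- _PRIORITY: first index of each lowercased candidate name
def pvPriority : PySem.Dict String Int :=
  (PySem.List.enumerate pvTaxpayerIdFields 0).foldl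
    (fun m p => m.setdefault (PySem.Str.lower p.2) p.1) PySem.Dict.empty

-- body of B's 'for low, (key, value) in survivors.items()' loop
def pvBestStep (best : Option (Int × String)) (e : String × (String × String)) :
    Option (Int × String) :=
  match pvPriority.get? e.1 with
  | none => best
  | some p =>
    if e.2.2 ≠ "" then
      match best with
      | none => some (p, e.2.1)
      | some b => if p < b.1 then some (p, e.2.1) else best
    else best

def find_taxpayer_id_field_alt (record : List (String × String)) : Option String :=
  let d := PySem.Dict.ofList record
  -- survivors = {k.lower(): (k, v) for k, v in record.items()}
  let survivors := d.items.foldl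
    (fun m p => m.insert (PySem.Str.lower p.1) p) (PySem.Dict.empty (κ := String))
  match survivors.items.foldl pvBestStep none with
  | none => none
  | some b => some b.2

-- ===== PRECONDITION & SPEC =====
def Spec_find_taxpayer_id_field (record : List (String × String)) (out : Option String) : Prop := out = find_taxpayer_id_field_alt record
instance (record : List (String × String)) (out : Option String) : Decidable (Spec_find_taxpayer_id_field record out) := by unfold Spec_find_taxpayer_id_field; infer_instance

-- ===== CLAIM (what is proved, stated in full; the proofs are below) =====
def Claim_equal_find_taxpayer_id_field : Prop := ∀ (record : List (String × String)), Dom_find_taxpayer_id_field record → Spec_find_taxpayer_id_field record (find_taxpayer_id_field record)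

-- ===== LEMMAS AND PROOFS =====

-- the last record entry whose lowercased key is t (what both lowercase dicts keep)
def pvLast (d : PySem.Dict String String) (t : String) : Option (String × String) :=
  d.items.reverse.find? (fun p => PySem.Str.lower p.1 == t)

-- the key A would return for lowercase candidate t, if its value is non-empty
def pvQd (d : PySem.Dict String String) (t : String) : Option String :=
  match pvLast d t with
  | some kv => if kv.2 ≠ "" then some kv.1 else none
  | none => none

-- what pvBestStep contributes for one survivors entry
def pvG (e : String × (String × String)) : Option (Int × String) :=
  match pvPriority.get? e.1 with
  | none => none
  | some p => if e.2.2 ≠ "" then some (p, e.2.1) else none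

-- the distinct lowercased candidates with their first indices (= _PRIORITY as a list)
def pvDP : List (String × Int) :=
  [("taxpayer_id", 0), ("taxpayer_number", 1), ("taxpayerid", 2), ("taxpayernumber", 3),
   ("tax_payer_number", 10), ("tax_payer_id", 11), ("taxpayer_no", 12), ("taxpayerno", 13),
   ("txpayer_id", 14), ("txpayer_number", 15), ("tp_id", 16), ("tp_number", 17), ("id", 18)]

theorem pvPriority_eq : pvPriority = PySem.Dict.mk pvDP := by decide

theorem pvP_mem : ∀ tp ∈ pvDP, pvPriority.get? tp.1 = some tp.2 := by decide

theorem pvPairwise : pvDP.Pairwise (fun a b => a.2 < b.2) := by decide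

theorem pvLowered : pvTaxpayerIdFields.map PySem.Str.lower =
    ["taxpayer_id", "taxpayer_number", "taxpayerid", "taxpayernumber", "taxpayerid",
     "taxpayerid", "taxpayerid", "taxpayernumber", "taxpayer_id", "taxpayer_number",
     "tax_payer_number", "tax_payer_id", "taxpayer_no", "taxpayerno", "txpayer_id",
     "txpayer_number", "tp_id", "tp_number", "id"] := by decide

theorem pvP_char (t : String) (p : Int) (h : pvPriority.get? t = some p) : (t, p) ∈ pvDP := by
  rw [pvPriority_eq] at h
  have hnd : (PySem.Dict.mk pvDP).keys.Nodup := by decide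
  exact (PySem.Dict.get?_eq_some_iff_mem_items _ t p hnd).mp h

-- a fold of lowercased-key inserts looks up the LAST matching entry
theorem pv_get?_foldl_insert {α ν : Type} (key : α → String) (val : α → ν) (l : List α)
    (m : PySem.Dict String ν) (t : String) :
    (l.foldl (fun m p => m.insert (key p) (val p)) m).get? t
      = ((l.reverse.find? (fun p => key p == t)).map val).orElse (fun _ => m.get? t) := by
  induction l generalizing m with
  | nil => simp
  | cons p₀ l ih =>
    simp only [List.foldl_cons, List.reverse_cons, List.find?_append, ih]
    cases h : l.reverse.find? (fun p => key p == t) with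
    | some q => simp [Option.orElse]
    | none =>
      simp only [Option.orElse, List.find?_cons, List.find?_nil]
      rw [PySem.Dict.get?_insert]
      by_cases ht : key p₀ = t
      · simp [ht]
      · have hb : (key p₀ == t) = false := beq_eq_false_iff_ne.mpr ht
        simp [hb]
        exact fun h' => absurd h'.symm ht

theorem pv_rfl_get? (d : PySem.Dict String String) (t : String) :
    (d.keys.foldl (fun m k => m.insert (PySem.Str.lower k) k) PySem.Dict.empty).get? t
      = (pvLast d t).map (·.1) := by
  have h := pv_get?_foldl_insert (key := fun k => PySem.Str.lower k) (val := fun k => k)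
    d.keys PySem.Dict.empty t
  rw [h]
  simp only [PySem.Dict.keys, ← List.map_reverse, List.find?_map, Function.comp_def, pvLast]
  cases hf : d.items.reverse.find? (fun p => PySem.Str.lower p.1 == t) <;> rfl

theorem pv_surv_get? (d : PySem.Dict String String) (t : String) :
    (d.items.foldl (fun m p => m.insert (PySem.Str.lower p.1) p)
        (PySem.Dict.empty (κ := String))).get? t = pvLast d t := by
  have h := pv_get?_foldl_insert (key := fun p => PySem.Str.lower p.1)
    (val := fun p : String × String => p) d.items PySem.Dict.empty t
  rw [h, pvLast]
  cases d.items.reverse.find? (fun p => PySem.Str.lower p.1 == t) <;>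
    simp [Option.orElse]

theorem pv_loopA_eq_findSome? (d : PySem.Dict String String) (hnd : d.keys.Nodup) (cs : List String) :
    pvLoopA d (d.keys.foldl (fun m k => m.insert (PySem.Str.lower k) k) PySem.Dict.empty) cs
      = (cs.map PySem.Str.lower).findSome? (pvQd d) := by
  induction cs with
  | nil => simp [pvLoopA]
  | cons c rest ih =>
    simp only [pvLoopA, List.map_cons, List.findSome?_cons, pv_rfl_get?]
    cases hl : pvLast d (PySem.Str.lower c) with
    | none => simp [pvQd, hl, ih]
    | some kv =>
      have hm : kv ∈ d.items := List.mem_reverse.mp (List.mem_of_find?_eq_some hl)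
      have hv : d.get? kv.1 = some kv.2 :=
        PySem.Dict.get?_of_mem_items d (by simpa using hm) hnd
      simp only [Option.map_some, hv, pvQd, hl, Option.getD_some]
      by_cases hne : kv.2 = ""
      · simp [hne, ih]
      · simp [hne]

theorem pv_dedup_findSome? (d : PySem.Dict String String) :
    (pvTaxpayerIdFields.map PySem.Str.lower).findSome? (pvQd d)
      = (pvDP.map (·.1)).findSome? (pvQd d) := by
  rw [pvLowered]
  cases h0 : pvQd d "taxpayer_id" <;> cases h1 : pvQd d "taxpayer_number" <;>
    cases h2 : pvQd d "taxpayerid" <;> cases h3 : pvQd d "taxpayernumber" <;>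
    simp [pvDP, List.findSome?_cons, h0, h1, h2, h3]

theorem pv_bridge (DP : List (String × Int)) (qual : List (Int × String))
    (d : PySem.Dict String String)
    (hpw : DP.Pairwise (fun a b => a.2 < b.2))
    (hq : ∀ pk ∈ qual, ∃ t, (t, pk.1) ∈ DP ∧ pvQd d t = some pk.2)
    (hd : ∀ tp ∈ DP, ∀ k, pvQd d tp.1 = some k → (tp.2, k) ∈ qual) :
    (qual.argmin (·.1)).map (·.2) = (DP.map (·.1)).findSome? (pvQd d) := by
  induction DP generalizing qual with
  | nil =>
    have hq0 : qual = [] := by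
      cases qual with
      | nil => rfl
      | cons x xs =>
        exfalso
        obtain ⟨t, ht, -⟩ := hq x (List.mem_cons_self ..)
        simp at ht
    simp [hq0]
  | cons tp0 DP' ih =>
    simp only [List.map_cons, List.findSome?_cons]
    cases hq0 : pvQd d tp0.1 with
    | none =>
      refine ih qual (List.Pairwise.of_cons hpw) ?_ ?_
      · intro pk hpk
        obtain ⟨t, ht, hqd⟩ := hq pk hpk
        rcases List.mem_cons.mp ht with heq | hmem
        · exfalso
          have ht0 : t = tp0.1 := congrArg Prod.fst heq
          rw [ht0, hq0] at hqd
          exact absurd hqd (by simp)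
        · exact ⟨t, hmem, hqd⟩
      · intro tp hmem k hk
        exact hd tp (List.mem_cons_of_mem _ hmem) k hk
    | some k0 =>
      have hmq : (tp0.2, k0) ∈ qual := hd tp0 (List.mem_cons_self ..) k0 hq0
      cases amin : qual.argmin (·.1) with
      | none =>
        rw [List.argmin_eq_none] at amin
        rw [amin] at hmq
        simp at hmq
      | some m =>
        have hmem : m ∈ qual := List.argmin_mem (show m ∈ qual.argmin (·.1) by rw [amin]; rfl)
        have hle : m.1 ≤ tp0.2 :=
          List.le_of_mem_argmin hmq (show m ∈ qual.argmin (·.1) by rw [amin]; rfl)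
        obtain ⟨t, ht, hqd⟩ := hq m hmem
        rcases List.mem_cons.mp ht with heq | hmem'
        · have ht0 : t = tp0.1 := congrArg Prod.fst heq
          rw [ht0, hq0] at hqd
          simp only [Option.map_some]
          rw [Option.some.inj hqd]
        · exfalso
          have hlt : tp0.2 < m.1 := (List.pairwise_cons.mp hpw).1 (t, m.1) hmem'
          omega

theorem pv_bestStep_eq (b : Option (Int × String)) (e : String × (String × String)) :
    pvBestStep b e = match pvG e with
      | none => b
      | some x => List.argAux (fun x y => x.1 < y.1) b x := by
  simp only [pvBestStep, pvG]
  cases pvPriority.get? e.1 with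
  | none => rfl
  | some p =>
    by_cases hne : e.2.2 = ""
    · simp [hne]
    · cases b <;> simp [hne, List.argAux]

theorem pv_fold_eq_argmin (l : List (String × (String × String))) :
    l.foldl pvBestStep none = (l.filterMap pvG).argmin (·.1) := by
  rw [List.argmin]
  generalize (none : Option (Int × String)) = b
  induction l generalizing b with
  | nil => rfl
  | cons e l ih =>
    simp only [List.foldl_cons, List.filterMap_cons, pv_bestStep_eq b e]
    cases pvG e with
    | none => exact ih b
    | some x =>
      simp only [List.foldl_cons]
      exact ih _

-- ===== VERDICT (by name: the statement is the Claim_ definition above) =====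
theorem find_taxpayer_id_field_spec : Claim_equal_find_taxpayer_id_field := by
  intro record _
  unfold Spec_find_taxpayer_id_field find_taxpayer_id_field find_taxpayer_id_field_alt
  set d := PySem.Dict.ofList record with hd
  have hnd : d.keys.Nodup := PySem.Dict.nodup_keys_ofList record
  set survivors := d.items.foldl (fun m p => m.insert (PySem.Str.lower p.1) p)
    (PySem.Dict.empty (κ := String)) with hsurv
  have hsn : survivors.keys.Nodup :=
    PySem.Dict.nodup_keys_foldl_insert_key d.items (fun p => PySem.Str.lower p.1)
      (fun _ p => p) PySem.Dict.empty (by simp)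
  have hmain : pvLoopA d (d.keys.foldl (fun m k => m.insert (PySem.Str.lower k) k) PySem.Dict.empty)
      pvTaxpayerIdFields
      = (match survivors.items.foldl pvBestStep none with
         | none => none
         | some b => some b.2) := by
    rw [pv_loopA_eq_findSome? d hnd, pv_dedup_findSome? d]
    rw [← pv_bridge pvDP (survivors.items.filterMap pvG) d pvPairwise ?hq ?hd]
    · rw [← pv_fold_eq_argmin]
      cases survivors.items.foldl pvBestStep none <;> rfl
    case hq =>
      intro pk hpk
      obtain ⟨e, he, hge⟩ := List.mem_filterMap.mp hpk
      have hge' : pvG e = some pk := hge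
      cases hp : pvPriority.get? e.1 with
      | none => exact absurd (by simpa only [pvG, hp] using hge' : (none : Option (Int × String)) = some pk) (by simp)
      | some p =>
        simp only [pvG, hp] at hge'
        by_cases hne : e.2.2 = ""
        · rw [if_neg (by simp [hne])] at hge'; exact absurd hge' (by simp)
        · rw [if_pos hne] at hge'
          have hp1 : p = pk.1 := congrArg Prod.fst (Option.some.inj hge')
          have hk2 : e.2.1 = pk.2 := congrArg Prod.snd (Option.some.inj hge')
          refine ⟨e.1, hp1 ▸ pvP_char e.1 p hp, ?_⟩
          have hget : survivors.get? e.1 = some e.2 :=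
            PySem.Dict.get?_of_mem_items survivors (by simpa using he) hsn
          rw [hsurv, pv_surv_get? d e.1] at hget
          simp only [pvQd, hget, if_pos hne]
          rw [hk2]
    case hd =>
      intro tp htp k hk
      cases hl : pvLast d tp.1 with
      | none => exact absurd (by simpa only [pvQd, hl] using hk : (none : Option String) = some k) (by simp)
      | some kv =>
        simp only [pvQd, hl] at hk
        by_cases hne : kv.2 = ""
        · rw [if_neg (by simp [hne])] at hk; exact absurd hk (by simp)
        · rw [if_pos hne] at hk
          have hget : survivors.get? tp.1 = some kv := by
            rw [hsurv, pv_surv_get? d tp.1]; exact hl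
          have hmem : (tp.1, kv) ∈ survivors.items :=
            PySem.Dict.mem_items_of_get?_eq_some survivors hget
          refine List.mem_filterMap.mpr ⟨(tp.1, kv), hmem, ?_⟩
          simp only [pvG, pvP_mem tp htp, if_pos hne]
          rw [Option.some.inj hk]
  by_cases hemp : record.isEmpty
  · have hrec : record = [] := List.isEmpty_iff.mp hemp
    subst hrec
    decide
  · simp only [hemp, Bool.false_eq_true, if_false]
    exact hmain
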